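-- pv_equiv track=rewrite | github.com/alvarovaq/PixelArt | herramientas.py | CuadroDentro
-- ===== SOURCE A (Python) =====
-- def colisionRecuadro (dimensiones, posicion1, posicion2) :
--
-- 	ancho = dimensiones[0]
-- 	alto = dimensiones[1]
--
-- 	posX1 = posicion1[0]
-- 	posY1 = posicion1[1]
--
-- 	posX2 = posicion2[0]
-- 	posY2 = posicion2[1]
--
-- 	if posX2 >= posX1 and posX2 <= posX1 + ancho :
-- 		if posY2 >= posY1 and posY2 <= posY1 + alto :
--
-- 			return True
--
-- 	return False
--
-- def CuadroDentro (dimensiones, posicion, dimensiones2, posicion2) :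
--
-- 	esquinas = [
--
-- 		(posicion2[0], posicion2[1]),
-- 		(posicion2[0] + dimensiones2[0], posicion2[1]),
-- 		(posicion2[0], posicion2[1] + dimensiones2[1]),
-- 		(posicion2[0] + dimensiones2[0], posicion2[1] + dimensiones2[1])
--
-- 	]
--
-- 	contador = 0
--
-- 	for i in range(4) :
-- 		if colisionRecuadro(dimensiones, posicion, esquinas[i]) :
-- 			contador += 1
--
-- 	return contador
-- ===== SOURCE B (Python) =====
-- def CuadroDentro(dimensiones, posicion, dimensiones2, posicion2):
--     xs = [posicion2[0], posicion2[0] + dimensiones2[0]]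
--     ys = [posicion2[1], posicion2[1] + dimensiones2[1]]
--     cx = sum(1 for x in xs if posicion[0] <= x <= posicion[0] + dimensiones[0])
--     cy = sum(1 for y in ys if posicion[1] <= y <= posicion[1] + dimensiones[1])
--     return cx * cy
-- ===== Notes on version B (the rewrite author's own statement) =====
-- stated objective: simpler
-- what changed: Replaces the explicit 4-corner list and per-corner collision test with counting in-range x and y coordinates separately and returning the product of the two counts.
import Mathlib
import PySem

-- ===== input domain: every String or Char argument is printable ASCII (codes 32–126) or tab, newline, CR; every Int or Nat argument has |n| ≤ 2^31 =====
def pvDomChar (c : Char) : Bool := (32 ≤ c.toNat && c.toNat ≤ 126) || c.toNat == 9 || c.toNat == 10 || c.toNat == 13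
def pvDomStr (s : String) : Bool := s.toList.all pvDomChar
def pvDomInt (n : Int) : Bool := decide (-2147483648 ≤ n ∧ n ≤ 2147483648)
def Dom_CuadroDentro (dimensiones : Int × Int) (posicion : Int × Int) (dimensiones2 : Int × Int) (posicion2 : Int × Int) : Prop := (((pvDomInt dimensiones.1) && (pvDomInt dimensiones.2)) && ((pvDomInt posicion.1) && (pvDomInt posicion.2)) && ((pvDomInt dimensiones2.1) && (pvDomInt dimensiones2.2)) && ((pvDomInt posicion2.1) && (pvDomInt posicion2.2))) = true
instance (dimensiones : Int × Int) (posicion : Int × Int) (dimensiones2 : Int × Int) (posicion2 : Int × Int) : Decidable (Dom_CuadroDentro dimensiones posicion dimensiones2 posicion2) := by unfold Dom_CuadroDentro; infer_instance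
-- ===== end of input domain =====

-- B replaces the 4-corner loop with a product of per-axis in-range counts (simpler decomposition, same O(1) cost).

-- ===== PORT A =====
def colisionRecuadro (dimensiones : Int × Int) (posicion1 : Int × Int) (posicion2 : Int × Int) : Bool :=
  let ancho := dimensiones.1
  let alto := dimensiones.2
  let posX1 := posicion1.1
  let posY1 := posicion1.2
  let posX2 := posicion2.1
  let posY2 := posicion2.2
  if posX2 ≥ posX1 ∧ posX2 ≤ posX1 + ancho then
    if posY2 ≥ posY1 ∧ posY2 ≤ posY1 + alto then true
    else false
  else false

def CuadroDentro (dimensiones : Int × Int) (posicion : Int × Int) (dimensiones2 : Int × Int) (posicion2 : Int × Int) : Int :=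
  let esquinas : List (Int × Int) :=
    [ (posicion2.1, posicion2.2),
      (posicion2.1 + dimensiones2.1, posicion2.2),
      (posicion2.1, posicion2.2 + dimensiones2.2),
      (posicion2.1 + dimensiones2.1, posicion2.2 + dimensiones2.2) ]
  (PySem.List.pyRange 0 4 1).foldl (fun contador i =>
    match PySem.List.pyGet? esquinas i with
    | some e => if colisionRecuadro dimensiones posicion e then contador + 1 else contador
    | none => contador) 0

-- ===== PORT B =====
def CuadroDentro_alt (dimensiones : Int × Int) (posicion : Int × Int) (dimensiones2 : Int × Int) (posicion2 : Int × Int) : Int :=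
  let xs : List Int := [posicion2.1, posicion2.1 + dimensiones2.1]
  let ys : List Int := [posicion2.2, posicion2.2 + dimensiones2.2]
  let cx : Int := xs.countP (fun x => posicion.1 ≤ x ∧ x ≤ posicion.1 + dimensiones.1)
  let cy : Int := ys.countP (fun y => posicion.2 ≤ y ∧ y ≤ posicion.2 + dimensiones.2)
  cx * cy

-- ===== PRECONDITION & SPEC =====
def Spec_CuadroDentro (dimensiones : Int × Int) (posicion : Int × Int) (dimensiones2 : Int × Int) (posicion2 : Int × Int) (out : Int) : Prop := out = CuadroDentro_alt dimensiones posicion dimensiones2 posicion2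
instance (dimensiones : Int × Int) (posicion : Int × Int) (dimensiones2 : Int × Int) (posicion2 : Int × Int) (out : Int) : Decidable (Spec_CuadroDentro dimensiones posicion dimensiones2 posicion2 out) := by unfold Spec_CuadroDentro; infer_instance

-- ===== CLAIM (what is proved, stated in full; the proofs are below) =====
def Claim_equal_CuadroDentro : Prop := ∀ (dimensiones : Int × Int) (posicion : Int × Int) (dimensiones2 : Int × Int) (posicion2 : Int × Int), Dom_CuadroDentro dimensiones posicion dimensiones2 posicion2 → Spec_CuadroDentro dimensiones posicion dimensiones2 posicion2 (CuadroDentro dimensiones posicion dimensiones2 posicion2)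

-- ===== LEMMAS AND PROOFS =====

-- ===== VERDICT (by name: the statement is the Claim_ definition above) =====
set_option maxHeartbeats 1000000 in
theorem CuadroDentro_spec : Claim_equal_CuadroDentro := by
  intro d p d2 p2 _
  unfold Spec_CuadroDentro CuadroDentro CuadroDentro_alt colisionRecuadro
  by_cases hx1 : p.1 ≤ p2.1 ∧ p2.1 ≤ p.1 + d.1 <;>
  by_cases hx2 : p.1 ≤ p2.1 + d2.1 ∧ p2.1 + d2.1 ≤ p.1 + d.1 <;>
  by_cases hy1 : p.2 ≤ p2.2 ∧ p2.2 ≤ p.2 + d.2 <;>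
  by_cases hy2 : p.2 ≤ p2.2 + d2.2 ∧ p2.2 + d2.2 ≤ p.2 + d.2 <;>
  simp [PySem.List.pyRange, PySem.List.pyGet?, PySem.List.pyIdx?, List.countP, List.countP.go,
    List.range_succ, Bool.cond_eq_ite, hx1, hx2, hy1, hy2]
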